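-- pv_equiv track=rewrite | github.com/SckyzO/rackscope | src/rackscope/telemetry/planner.py | _digit_ranges
-- ===== SOURCE A (Python) =====
-- from typing import Dict, List, Iterable, Optional, Tuple
--
-- def _digit_ranges(digits: List[str]) -> List[Tuple[str, str]]:
--     ranges: List[Tuple[str, str]] = []
--     start = prev = digits[0]
--     for d in digits[1:]:
--         if ord(d) == ord(prev) + 1:
--             prev = d
--             continue
--         ranges.append((start, prev))
--         start = prev = d
--     ranges.append((start, prev))
--     return ranges
-- ===== SOURCE B (Python) =====
-- from typing import List, Tuple
--
-- def _digit_ranges(digits: List[str]) -> List[Tuple[str, str]]: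
--     # Boundary decomposition: a run break sits between p and d when d is not p's successor.
--     pairs = list(zip(digits, digits[1:]))
--     starts = [digits[0]] + [d for p, d in pairs if ord(d) != ord(p) + 1]
--     ends = [p for p, d in pairs if ord(d) != ord(p) + 1] + [digits[-1]]
--     return list(zip(starts, ends))
-- ===== Notes on version B (the rewrite author's own statement) =====
-- stated objective: alternative
-- what changed: Replaces A's single stateful accumulator loop by a two-pass boundary decomposition: filter the list of adjacent pairs for run breaks, derive the run starts and run ends from it, and zip them.
import Mathlib
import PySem

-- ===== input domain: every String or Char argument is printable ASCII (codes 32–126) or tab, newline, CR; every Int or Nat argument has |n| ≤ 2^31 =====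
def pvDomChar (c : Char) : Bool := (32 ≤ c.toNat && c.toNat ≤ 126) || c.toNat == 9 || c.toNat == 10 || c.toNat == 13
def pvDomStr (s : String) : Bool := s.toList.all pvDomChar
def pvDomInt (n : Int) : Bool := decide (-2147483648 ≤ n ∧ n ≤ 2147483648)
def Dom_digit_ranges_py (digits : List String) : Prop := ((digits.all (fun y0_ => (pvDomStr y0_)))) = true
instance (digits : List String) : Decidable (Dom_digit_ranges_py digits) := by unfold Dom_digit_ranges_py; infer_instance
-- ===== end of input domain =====

-- B replaces A's single stateful accumulator loop by a two-pass boundary decomposition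
-- (filter adjacent pairs for run breaks, derive run starts and ends, zip them); objective: alternative.


-- ===== PORT A =====
-- ord(s): code point of a length-1 string; Python raises TypeError on other strings,
-- and Pre_ excludes every input on which ord is actually called with one (exact on Pre_).
def pyOrd (s : String) : Int :=
  match s.toList with
  | [c] => (c.toNat : Int)
  | _ => 0

-- the 'for d in digits[1:]' loop, carrying (start, prev, ranges)
def digitRangesLoop (ds : List String) (start prev : String)
    (ranges : List (String × String)) : List (String × String) :=
  match ds with
  | [] => ranges ++ [(start, prev)]
  | d :: rest =>
    if pyOrd d = pyOrd prev + 1 then digitRangesLoop rest start d ranges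
    else digitRangesLoop rest d d (ranges ++ [(start, prev)])

def digit_ranges_py (digits : List String) : List (String × String) :=
  match digits with
  | [] => []  -- Python: digits[0] raises IndexError here; excluded by Pre_
  | d0 :: rest => digitRangesLoop rest d0 d0 []

-- ===== PORT B =====
def isBreak (pd : String × String) : Bool := pyOrd pd.2 != pyOrd pd.1 + 1

def digit_ranges_py_alt (digits : List String) : List (String × String) :=
  match digits with
  | [] => []  -- Python: digits[0] raises IndexError here; excluded by Pre_
  | d0 :: _ =>
    let pairs := digits.zip (digits.drop 1)
    let brk := pairs.filter isBreak
    let starts := d0 :: brk.map Prod.snd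
    let ends := brk.map Prod.fst ++ [digits.getLastD ""]  -- digits[-1]; list is nonempty here
    starts.zip ends

-- ===== PRECONDITION & SPEC =====
-- A raises IndexError on the empty list, and raises TypeError (from ord) when the list has
-- at least two elements and some element is not a single character; Pre_ excludes exactly those.
def Pre_digit_ranges_py (digits : List String) : Prop :=
  digits ≠ [] ∧ (digits.length ≤ 1 ∨ ∀ s ∈ digits, s.toList.length = 1)
instance (digits : List String) : Decidable (Pre_digit_ranges_py digits) := by
  unfold Pre_digit_ranges_py; infer_instance

def pvWitness_digit_ranges_py : List String := ["3", "5", "6", "7", "9"]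

def Spec_digit_ranges_py (digits : List String) (out : List (String × String)) : Prop := out = digit_ranges_py_alt digits
instance (digits : List String) (out : List (String × String)) : Decidable (Spec_digit_ranges_py digits out) := by unfold Spec_digit_ranges_py; infer_instance

-- ===== CLAIM (what is proved, stated in full; the proofs are below) =====
def Claim_equal_digit_ranges_py : Prop := ∀ (digits : List String), Dom_digit_ranges_py digits → Pre_digit_ranges_py digits → Spec_digit_ranges_py digits (digit_ranges_py digits)

-- ===== LEMMAS AND PROOFS =====

-- replace the first component of the first pair
def setFst (x : String) : List (String × String) → List (String × String)
  | [] => []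
  | (_, b) :: t => (x, b) :: t

lemma setFst_setFst (x y : String) (l : List (String × String)) :
    setFst x (setFst y l) = setFst x l := by
  cases l with
  | nil => rfl
  | cons h t => cases h; rfl

lemma digitRangesLoop_append (ds : List String) (start prev : String)
    (r : List (String × String)) :
    digitRangesLoop ds start prev r = r ++ digitRangesLoop ds start prev [] := by
  induction ds generalizing start prev r with
  | nil => simp [digitRangesLoop]
  | cons d rest ih =>
    simp only [digitRangesLoop]
    split_ifs with h
    · exact ih start d r
    · simp only [List.nil_append]
      rw [ih d d (r ++ [(start, prev)]), ih d d [(start, prev)]]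
      simp

lemma digitRangesLoop_setFst (ds : List String) (start prev : String) :
    digitRangesLoop ds start prev [] = setFst start (digitRangesLoop ds prev prev []) := by
  induction ds generalizing start prev with
  | nil => simp [digitRangesLoop, setFst]
  | cons d rest ih =>
    simp only [digitRangesLoop]
    split_ifs with h
    · rw [ih start d, ih prev d, setFst_setFst]
    · simp only [List.nil_append]
      rw [digitRangesLoop_append rest d d [(start, prev)],
          digitRangesLoop_append rest d d [(prev, prev)]]
      simp [setFst]

lemma zip_cons_setFst (a b : String) (m : List String) (e : List String) (he : e ≠ []) :
    (a :: m).zip e = setFst a ((b :: m).zip e) := by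
  cases e with
  | nil => exact absurd rfl he
  | cons x xs => simp [List.zip, setFst]

lemma alt_eq_loop (rest : List String) (d0 : String) :
    digit_ranges_py_alt (d0 :: rest) = digitRangesLoop rest d0 d0 [] := by
  induction rest generalizing d0 with
  | nil => rfl
  | cons d1 rest' ih =>
    simp only [digit_ranges_py_alt, digitRangesLoop] at *
    by_cases h : pyOrd d1 = pyOrd d0 + 1
    · -- no break between d0 and d1: first run extends; shift its start with setFst
      have hfilt : isBreak (d0, d1) = false := by simp [isBreak, h]
      rw [if_pos h, digitRangesLoop_setFst rest' d0 d1, ← ih d1]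
      simp only [List.drop_succ_cons, List.drop_zero, List.zip_cons_cons, List.filter_cons,
        hfilt, List.getLastD_cons]
      exact zip_cons_setFst d0 d1 _ _ (by simp)
    · -- break between d0 and d1: (d0, d0) is emitted, rest is the tail's decomposition
      have hfilt : isBreak (d0, d1) = true := by simp [isBreak, h]
      rw [if_neg h]
      simp only [List.nil_append]
      rw [digitRangesLoop_append rest' d1 d1 [(d0, d0)], ← ih d1]
      simp [hfilt, List.zip]

-- ===== VERDICT (by name: the statement is the Claim_ definition above) =====
theorem digit_ranges_py_spec : Claim_equal_digit_ranges_py := by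
  intro digits _ hpre
  cases digits with
  | nil => exact absurd rfl hpre.1
  | cons d0 rest =>
    show digit_ranges_py (d0 :: rest) = digit_ranges_py_alt (d0 :: rest)
    rw [alt_eq_loop]
    rfl
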